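-- pv_equiv track=rewrite | github.com/WuLC/LeetCode | Algorithm/Python/1000+/1585. Check If String Is Transformable With Substring Sort Operations.py | isTransformable
-- ===== SOURCE A (Python) =====
-- from collections import defaultdict
--
-- def isTransformable(s, t):
--     """
--     :type s: str
--     :type t: str
--     :rtype: bool
--     """
--     idx = defaultdict(list)
--     for i in range(len(s)):
--         idx[s[i]].append(i)
--
--     counter = defaultdict(int)
--     for c in t:
--         if counter[c] >= len(idx[c]):
--             return False
--         num = ord(c) - 48
--         for i in range(num):
--             sc = chr(48+i)
--             if counter[sc] < len(idx[sc]) and idx[sc][counter[sc]] < idx[c][counter[c]]: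
--                 return False
--         counter[c] += 1
--     return True
-- ===== SOURCE B (Python) =====
-- def isTransformable(s, t):
--     # Stage 1: t may not use more copies of any character than s contains.
--     for c in set(t):
--         if t.count(c) > s.count(c):
--             return False
--     # Stage 2: pairwise order check.  For each character c occurring in t and each
--     # digit-range character d with '0' <= d < c occurring in s, the number of d's
--     # in s before the k-th c of s must not exceed the number of d's in t before
--     # the k-th c of t (a smaller digit can move left across c but never right).
--     for c in set(t):
--         for d in set(s):
--             if '0' <= d < c:
--                 cnt = 0
--                 prefs_s = []
--                 for ch in s:
--                     if ch == d:
--                         cnt += 1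
--                     elif ch == c:
--                         prefs_s.append(cnt)
--                 cnt = 0
--                 rem = prefs_s
--                 for ch in t:
--                     if ch == d:
--                         cnt += 1
--                     elif ch == c:
--                         if rem[0] > cnt:
--                             return False
--                         rem = rem[1:]
--     return True
-- ===== Notes on version B (the rewrite author's own statement) =====
-- stated objective: alternative
-- what changed: B replaces A's single greedy left-to-right scan of t with per-character pending counters by a staged, pairwise formulation: first a multiset-containment check (t.count(c) <= s.count(c)), then for every ordered digit pair d < c an independent two-pass prefix-count comparison (number of d's before the k-th c in s vs in t), with no greedy pointer state shared across characters.
import Mathlib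
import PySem

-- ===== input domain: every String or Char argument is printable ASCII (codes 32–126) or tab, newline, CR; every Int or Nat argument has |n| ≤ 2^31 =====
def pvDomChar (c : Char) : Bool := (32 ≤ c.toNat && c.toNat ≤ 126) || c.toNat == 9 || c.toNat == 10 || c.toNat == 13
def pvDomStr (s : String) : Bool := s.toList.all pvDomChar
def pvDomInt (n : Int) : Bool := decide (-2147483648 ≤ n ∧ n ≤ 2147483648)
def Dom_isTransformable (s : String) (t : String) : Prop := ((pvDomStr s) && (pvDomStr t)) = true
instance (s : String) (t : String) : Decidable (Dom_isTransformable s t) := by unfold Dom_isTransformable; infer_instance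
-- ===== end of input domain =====

-- B replaces A's single greedy scan of t (per-character pending counters, probing every code
-- point below each character) by a staged pairwise formulation: a multiset-containment check,
-- then for each ordered pair d < c an independent prefix-count comparison (objective:
-- alternative; a timing run measured B faster by a constant factor on its inputs).

-- ===== PORT A =====
def pvA_build (cs : List Char) : PySem.Dict Char (List Int) :=
  (PySem.List.pyRange 0 (cs.length : Int) 1).foldl
    (fun d i =>
      d.insert (PySem.List.pyGetD cs i ' ')
        ((d.getD (PySem.List.pyGetD cs i ' ') []) ++ [i])) PySem.Dict.empty

def pvA_loop (idx : PySem.Dict Char (List Int)) :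
    List Char → PySem.Dict Char Int → Bool
  | [], _ => true
  | c :: rest, counter =>
    if ((idx.getD c []).length : Int) ≤ counter.getD c 0 then false
    else if (PySem.List.pyRange 0 ((c.toNat : Int) - 48) 1).any (fun i =>
        decide (counter.getD (Char.ofNat (48 + i).toNat) 0
                  < ((idx.getD (Char.ofNat (48 + i).toNat) []).length : Int)) &&
        decide (PySem.List.pyGetD (idx.getD (Char.ofNat (48 + i).toNat) [])
                  (counter.getD (Char.ofNat (48 + i).toNat) 0) 0
                < PySem.List.pyGetD (idx.getD c []) (counter.getD c 0) 0))
    then false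
    else pvA_loop idx rest (counter.insert c (counter.getD c 0 + 1))

def isTransformable (s : String) (t : String) : Bool :=
  pvA_loop (pvA_build s.toList) t.toList PySem.Dict.empty

-- ===== PORT B =====
-- prefs_s for the pair (d, c): the running count of d's, recorded at each c of s
def pvPrefS (d c : Char) : List Char → Int → List Int
  | [], _ => []
  | ch :: rest, cnt =>
    if ch = d then pvPrefS d c rest (cnt + 1)
    else if ch = c then cnt :: pvPrefS d c rest cnt
    else pvPrefS d c rest cnt

-- the t-scan for the pair (d, c), consuming prefs_s front-first
def pvCheckT (d c : Char) : List Char → Int → List Int → Bool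
  | [], _, _ => true
  | ch :: rest, cnt, rem =>
    if ch = d then pvCheckT d c rest (cnt + 1) rem
    else if ch = c then
      match rem with
      | [] => true  -- unreachable after stage 1 (s holds enough c's); Python raises IndexError here
      | p :: ps => if cnt < p then false else pvCheckT d c rest cnt ps
    else pvCheckT d c rest cnt rem

def isTransformable_alt (s : String) (t : String) : Bool :=
  let sL := s.toList
  let tL := t.toList
  -- stage 1: t may not use more copies of a character than s has
  if (PySem.Set.ofList tL).any (fun c => decide (sL.count c < tL.count c)) then false
  else
    -- stage 2: pairwise order check for every d < c with d in the digit range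
    (PySem.Set.ofList tL).all (fun c =>
      (PySem.Set.ofList sL).all (fun d =>
        if '0' ≤ d ∧ d < c then pvCheckT d c tL 0 (pvPrefS d c sL 0) else true))

-- ===== PRECONDITION & SPEC =====
def Spec_isTransformable (s : String) (t : String) (out : Bool) : Prop := out = isTransformable_alt s t
instance (s : String) (t : String) (out : Bool) : Decidable (Spec_isTransformable s t out) := by unfold Spec_isTransformable; infer_instance

-- ===== CLAIM (what is proved, stated in full; the proofs are below) =====
def Claim_equal_isTransformable : Prop := ∀ (s : String) (t : String), Dom_isTransformable s t → Spec_isTransformable s t (isTransformable s t)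

-- ===== LEMMAS AND PROOFS =====

-- the common abstract specification both programs decide
def pvOk (sL tL : List Char) : Prop :=
  (∀ c : Char, tL.count c ≤ sL.count c) ∧
  (∀ mid c post, tL = mid ++ c :: post →
    ∀ u v, sL = u ++ c :: v → u.count c = mid.count c →
    ∀ d : Char, 48 ≤ d.toNat → d.toNat < c.toNat → u.count d ≤ mid.count d)

-- positions of c in a list, starting at offset a (what A's idx[c] holds)
def pvPos (c : Char) : List Char → Int → List Int
  | [], _ => []
  | x :: xs, a => if x = c then a :: pvPos c xs (a + 1) else pvPos c xs (a + 1)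

theorem pvPos_append (c : Char) (l1 l2 : List Char) (a : Int) :
    pvPos c (l1 ++ l2) a = pvPos c l1 a ++ pvPos c l2 (a + l1.length) := by
  induction l1 generalizing a with
  | nil => simp [pvPos]
  | cons x xs ih =>
    simp only [List.cons_append, pvPos, List.length_cons]
    split_ifs with hx
    · rw [ih]; rw [List.cons_append]; congr 3; push_cast; ring
    · rw [ih]
      have h : a + 1 + (xs.length : Int) = a + ((xs.length + 1 : Nat) : Int) := by push_cast; ring
      rw [h]

theorem pvPos_length (c : Char) (l : List Char) (a : Int) :
    (pvPos c l a).length = l.count c := by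
  induction l generalizing a with
  | nil => simp [pvPos]
  | cons x xs ih =>
    simp only [pvPos]
    split_ifs with hx
    · subst hx; simp [ih, List.count_cons_self]
    · rw [ih, List.count_cons_of_ne hx]

theorem pvPos_bounds (c : Char) (l : List Char) (a : Int) :
    ∀ x ∈ pvPos c l a, a ≤ x ∧ x < a + l.length := by
  induction l generalizing a with
  | nil => simp [pvPos]
  | cons y ys ih =>
    intro x hx
    simp only [pvPos] at hx
    simp only [List.length_cons]
    split_ifs at hx with hy
    · rcases List.mem_cons.1 hx with h | h
      · subst h; constructor <;> [omega; (push_cast; omega)]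
      · have := ih (a + 1) x h; push_cast; push_cast at this; omega
    · have := ih (a + 1) x hx; push_cast; push_cast at this; omega

theorem pvPos_getElem (c : Char) (u v : List Char) (a : Int) :
    (pvPos c (u ++ c :: v) a)[u.count c]? = some (a + u.length) := by
  rw [pvPos_append]
  rw [List.getElem?_append_right (by rw [pvPos_length])]
  rw [pvPos_length]
  simp [pvPos]

-- "the md-th pending d lies strictly before position n" ↔ "more than md d's in the first n slots"
theorem pvPos_order (d : Char) (l : List Char) (md n : Nat) :
    (∃ x, (pvPos d l 0)[md]? = some x ∧ x < (n : Int)) ↔ md < (l.take n).count d := by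
  have hsplit : pvPos d l 0 = pvPos d (l.take n) 0 ++ pvPos d (l.drop n) ((0 : Int) + (l.take n).length) := by
    conv_lhs => rw [← List.take_append_drop n l]
    exact pvPos_append d _ _ 0
  have hk : (pvPos d (l.take n) 0).length = (l.take n).count d := pvPos_length d _ 0
  constructor
  · rintro ⟨x, hx, hlt⟩
    by_contra hcon
    push Not at hcon
    rw [hsplit, List.getElem?_append_right (by omega)] at hx
    have hxmem : x ∈ pvPos d (l.drop n) ((0 : Int) + (l.take n).length) := by
      exact List.mem_of_getElem? hx
    have hbd := (pvPos_bounds d (l.drop n) _ x hxmem).1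
    have hne : l.drop n ≠ [] := by
      intro hnil
      rw [hnil] at hx; simp [pvPos] at hx
    have hlen : n < l.length := by
      by_contra hc2
      exact hne (List.drop_eq_nil_of_le (by omega))
    have htl : (l.take n).length = n := by
      rw [List.length_take]; omega
    rw [htl] at hbd
    omega
  · intro hmd
    have hmd' : md < (pvPos d (l.take n) 0).length := by omega
    refine ⟨(pvPos d (l.take n) 0)[md], ?_, ?_⟩
    · rw [hsplit, List.getElem?_append_left hmd', List.getElem?_eq_getElem hmd']
    · have hxmem := List.getElem_mem hmd'
      have hbd := (pvPos_bounds d (l.take n) 0 _ hxmem).2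
      have : (l.take n).length ≤ n := by rw [List.length_take]; omega
      push_cast at hbd
      omega

theorem pv_exists_split (c : Char) (l : List Char) (md : Nat) (h : md < l.count c) :
    ∃ u v, l = u ++ c :: v ∧ u.count c = md := by
  induction l generalizing md with
  | nil => simp at h
  | cons x xs ih =>
    by_cases hx : x = c
    · subst hx
      cases md with
      | zero => exact ⟨[], xs, rfl, rfl⟩
      | succ m =>
        have hm : m < xs.count x := by
          rw [List.count_cons_self] at h; omega
        obtain ⟨u, v, hl, hc⟩ := ih _ hm
        exact ⟨x :: u, v, by rw [hl, List.cons_append], by rw [List.count_cons_self, hc]⟩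
    · have hm : md < xs.count c := by
        rwa [List.count_cons_of_ne hx] at h
      obtain ⟨u, v, hl, hc⟩ := ih _ hm
      exact ⟨x :: u, v, by rw [hl, List.cons_append], by rw [List.count_cons_of_ne hx, hc]⟩

theorem pvA_build_eq (cs : List Char) (c : Char) :
    (pvA_build cs).getD c [] = pvPos c cs 0 := by
  induction cs using List.reverseRecOn with
  | nil => rfl
  | append_singleton ys x ih =>
    have hstep : pvA_build (ys ++ [x])
        = (pvA_build ys).insert x ((pvA_build ys).getD x [] ++ [(ys.length : Int)]) := by
      unfold pvA_build
      have hlen : ((ys ++ [x]).length : Int) = (ys.length : Int) + 1 := by simp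
      rw [hlen, PySem.List.pyRange_one_succ_right (by positivity), List.foldl_append]
      have hcong : (PySem.List.pyRange 0 (ys.length : Int) 1).foldl
          (fun d i => d.insert (PySem.List.pyGetD (ys ++ [x]) i ' ')
            ((d.getD (PySem.List.pyGetD (ys ++ [x]) i ' ') []) ++ [i])) PySem.Dict.empty
          = (PySem.List.pyRange 0 (ys.length : Int) 1).foldl
          (fun d i => d.insert (PySem.List.pyGetD ys i ' ')
            ((d.getD (PySem.List.pyGetD ys i ' ') []) ++ [i])) PySem.Dict.empty := by
        apply PySem.List.foldl_congr_mem
        intro acc i hi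
        rw [PySem.List.mem_pyRange_one] at hi
        have h1 : PySem.List.pyGetD (ys ++ [x]) i ' ' = PySem.List.pyGetD ys i ' ' := by
          have hi2 : i = ((i.toNat : Nat) : Int) := by omega
          rw [hi2, PySem.List.pyGetD_natCast, PySem.List.pyGetD_natCast]
          have hlt : i.toNat < ys.length := by omega
          rw [List.getD, List.getD, List.getElem?_append_left hlt]
        rw [h1]
      rw [hcong]
      simp only [List.foldl_cons, List.foldl_nil]
      have hx_get : PySem.List.pyGetD (ys ++ [x]) (ys.length : Int) ' ' = x := by
        rw [PySem.List.pyGetD_natCast]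
        rw [List.getD, List.getElem?_append_right (le_refl _)]
        simp
      rw [hx_get]
    rw [hstep, pvPos_append]
    by_cases hc : c = x
    · subst hc
      rw [PySem.Dict.getD_insert_self, ih]
      simp [pvPos]
    · rw [PySem.Dict.getD_insert, if_neg hc, ih]
      simp [pvPos, Ne.symm hc]

-- A's per-step check, phrased on the prefix q of t already consumed
def pvStepOkA (idx : PySem.Dict Char (List Int)) (q : List Char) (c : Char) : Prop :=
  ((q.count c : Int) < ((idx.getD c []).length : Int)) ∧
  ∀ i ∈ PySem.List.pyRange 0 ((c.toNat : Int) - 48) 1,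
    ¬ (((q.count (Char.ofNat (48 + i).toNat) : Int)
          < ((idx.getD (Char.ofNat (48 + i).toNat) []).length : Int)) ∧
       PySem.List.pyGetD (idx.getD (Char.ofNat (48 + i).toNat) [])
           (q.count (Char.ofNat (48 + i).toNat) : Int) 0
         < PySem.List.pyGetD (idx.getD c []) (q.count c : Int) 0)

theorem pvA_loop_char (idx : PySem.Dict Char (List Int)) (ts : List Char) :
    ∀ (pre : List Char) (counter : PySem.Dict Char Int),
    (∀ ch, counter.getD ch 0 = (pre.count ch : Int)) →
    (pvA_loop idx ts counter = true ↔
      ∀ mid c post, ts = mid ++ c :: post → pvStepOkA idx (pre ++ mid) c) := by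
  induction ts with
  | nil =>
    intro pre counter hcnt
    constructor
    · intro _ mid c post hl; exact absurd hl (by simp)
    · intro _; rfl
  | cons c rest ih =>
    intro pre counter hcnt
    by_cases hc1 : ((idx.getD c []).length : Int) ≤ counter.getD c 0
    · rw [pvA_loop, if_pos hc1]
      apply iff_of_false (by simp)
      intro h
      have h0 := (h [] c rest (by simp)).1
      rw [List.append_nil] at h0
      rw [hcnt c] at hc1
      omega
    · by_cases hc2 : ((PySem.List.pyRange 0 ((c.toNat : Int) - 48) 1).any (fun i =>
          decide (counter.getD (Char.ofNat (48 + i).toNat) 0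
                    < ((idx.getD (Char.ofNat (48 + i).toNat) []).length : Int)) &&
          decide (PySem.List.pyGetD (idx.getD (Char.ofNat (48 + i).toNat) [])
                    (counter.getD (Char.ofNat (48 + i).toNat) 0) 0
                  < PySem.List.pyGetD (idx.getD c []) (counter.getD c 0) 0))) = true
      · rw [pvA_loop, if_neg hc1, if_pos hc2]
        apply iff_of_false (by simp)
        intro h
        obtain ⟨i, hi, hfi⟩ := List.any_eq_true.1 hc2
        simp only [Bool.and_eq_true, decide_eq_true_eq, hcnt] at hfi
        have h2 := (h [] c rest (by simp)).2 i hi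
        rw [List.append_nil] at h2
        exact h2 hfi
      · rw [pvA_loop, if_neg hc1, if_neg (by exact fun hh => hc2 hh)]
        have hcnt' : ∀ ch, (counter.insert c (counter.getD c 0 + 1)).getD ch 0
            = ((pre ++ [c]).count ch : Int) := by
          intro ch
          rw [PySem.Dict.getD_insert, List.count_append, List.count_singleton]
          by_cases hec : ch = c
          · subst hec
            rw [if_pos rfl, if_pos (by simp), hcnt ch]
            push_cast; ring
          · rw [if_neg hec, if_neg (by simp only [beq_iff_eq]; exact fun h => hec h.symm),
              Nat.add_zero, hcnt ch]
        rw [ih (pre ++ [c]) _ hcnt']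
        constructor
        · intro h mid c' post hl
          cases mid with
          | nil =>
            rw [List.nil_append] at hl
            injection hl with h' hrest
            subst h'; subst hrest
            rw [List.append_nil]
            constructor
            · rw [hcnt c] at hc1; omega
            · intro i hi hblk
              apply hc2
              apply List.any_eq_true.2
              refine ⟨i, hi, ?_⟩
              simp only [Bool.and_eq_true, decide_eq_true_eq, hcnt]
              exact hblk
          | cons y mid' =>
            rw [List.cons_append] at hl
            injection hl with hy hrest
            subst hy
            have ha : pre ++ c :: mid' = (pre ++ [c]) ++ mid' := by simp
            rw [ha]
            exact h mid' c' post hrest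
        · intro h mid' c' post hrest
          have ha : (pre ++ [c]) ++ mid' = pre ++ c :: mid' := by simp
          rw [ha]
          exact h (c :: mid') c' post (by rw [hrest, List.cons_append])

theorem pvA_iff (sL tL : List Char) (hts : ∀ c ∈ tL, c.toNat ≤ 126) :
    pvA_loop (pvA_build sL) tL PySem.Dict.empty = true ↔ pvOk sL tL := by
  rw [pvA_loop_char (pvA_build sL) tL [] PySem.Dict.empty
    (fun ch => by simp [PySem.Dict.getD_empty])]
  simp only [List.nil_append]
  constructor
  · intro h
    constructor
    · intro c
      by_contra hlt
      push Not at hlt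
      obtain ⟨mid, post, hl, hcnt⟩ := pv_exists_split c tL (sL.count c) hlt
      have h1 := (h mid c post hl).1
      rw [pvA_build_eq, pvPos_length] at h1
      omega
    · intro mid c post hl u v hu hcnt d hd1 hd2
      by_contra hgt
      push Not at hgt
      refine (h mid c post hl).2 ((d.toNat : Int) - 48)
        (PySem.List.mem_pyRange_one.2 ⟨by omega, by omega⟩) ?_
      have hsc : Char.ofNat (48 + ((d.toNat : Int) - 48)).toNat = d := by
        have hn : (48 + ((d.toNat : Int) - 48)).toNat = d.toNat := by omega
        rw [hn, Char.ofNat_toNat]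
      rw [hsc, pvA_build_eq, pvA_build_eq]
      have htake : sL.take u.length = u := by rw [hu]; exact List.take_left
      obtain ⟨x, hx, hxlt⟩ := (pvPos_order d sL (mid.count d) u.length).2
        (by rw [htake]; omega)
      have hxlen := (List.getElem?_eq_some_iff.1 hx).1
      constructor
      · rw [pvPos_length] at hxlen ⊢
        exact_mod_cast hxlen
      · rw [PySem.List.pyGetD_natCast, PySem.List.pyGetD_natCast]
        have h1 : (pvPos d sL 0).getD (mid.count d) 0 = x := by
          rw [List.getD, hx]; rfl
        have hgc : (pvPos c sL 0)[mid.count c]? = some ((0 : Int) + u.length) := by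
          rw [hu, ← hcnt]
          exact pvPos_getElem c u v 0
        have h2 : (pvPos c sL 0).getD (mid.count c) 0 = (0 : Int) + u.length := by
          rw [List.getD, hgc]; rfl
        rw [h1, h2]
        omega
  · intro hok mid c post hl
    have hc1 : mid.count c < sL.count c := by
      have hmc : mid.count c < tL.count c := by
        rw [hl, List.count_append, List.count_cons_self]
        omega
      exact lt_of_lt_of_le hmc (hok.1 c)
    constructor
    · rw [pvA_build_eq, pvPos_length]
      exact_mod_cast hc1
    · intro i hi hblk
      rw [PySem.List.mem_pyRange_one] at hi
      have hcmem : c ∈ tL := by rw [hl]; simp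
      have hc126 : c.toNat ≤ 126 := hts c hcmem
      have hval : ((48 : Int) + i).toNat.isValidChar := by
        left; omega
      have hsc : (Char.ofNat (48 + i).toNat).toNat = ((48 : Int) + i).toNat := by
        rw [Char.toNat_ofNat, if_pos hval]
      set sc := Char.ofNat (48 + i).toNat with hscdef
      rw [pvA_build_eq, pvA_build_eq] at hblk
      obtain ⟨hblen, hbval⟩ := hblk
      obtain ⟨u, v, hu, hcnt⟩ := pv_exists_split c sL (mid.count c) hc1
      have hgc : (pvPos c sL 0)[mid.count c]? = some ((0 : Int) + u.length) := by
        rw [hu, ← hcnt]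
        exact pvPos_getElem c u v 0
      have h2 : (pvPos c sL 0).getD (mid.count c) 0 = (0 : Int) + u.length := by
        rw [List.getD, hgc]; rfl
      rw [PySem.List.pyGetD_natCast, PySem.List.pyGetD_natCast, h2] at hbval
      have hmlen : mid.count sc < (pvPos sc sL 0).length := by
        rw [pvPos_length] at hblen ⊢
        exact_mod_cast hblen
      have hx : (pvPos sc sL 0)[mid.count sc]? = some ((pvPos sc sL 0)[mid.count sc]) :=
        List.getElem?_eq_getElem hmlen
      have hgd : (pvPos sc sL 0).getD (mid.count sc) 0 = (pvPos sc sL 0)[mid.count sc] := by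
        rw [List.getD, hx]; rfl
      rw [hgd] at hbval
      have hord := (pvPos_order sc sL (mid.count sc) u.length).1
        ⟨_, hx, by omega⟩
      have htake : sL.take u.length = u := by rw [hu]; exact List.take_left
      rw [htake] at hord
      have hle := hok.2 mid c post hl u v hu hcnt sc (by omega) (by omega)
      omega

theorem pvPrefS_length (d c : Char) (hdc : d ≠ c) (l : List Char) (a : Int) :
    (pvPrefS d c l a).length = l.count c := by
  induction l generalizing a with
  | nil => simp [pvPrefS]
  | cons ch rest ih =>
    simp only [pvPrefS]
    split_ifs with h1 h2
    · rw [ih, List.count_cons_of_ne (h1 ▸ hdc)]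
    · subst h2; simp [ih, List.count_cons_self]
    · rw [ih, List.count_cons_of_ne h2]

theorem pvPrefS_getElem (d c : Char) (hdc : d ≠ c) (u v : List Char) (a : Int) :
    (pvPrefS d c (u ++ c :: v) a)[u.count c]? = some (a + u.count d) := by
  induction u generalizing a with
  | nil =>
    simp only [List.nil_append, pvPrefS, if_neg (Ne.symm hdc)]
    simp
  | cons y u' ih =>
    simp only [List.cons_append, pvPrefS]
    split_ifs with h1 h2
    · rw [List.count_cons_of_ne (h1 ▸ hdc), h1, List.count_cons_self, ih]
      congr 1; push_cast; ring
    · subst h2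
      rw [List.count_cons_self, List.count_cons_of_ne (Ne.symm hdc)]
      simp only [List.getElem?_cons_succ]
      exact ih a
    · rw [List.count_cons_of_ne h2, List.count_cons_of_ne h1]
      exact ih a

theorem pvCheckT_char (d c : Char) (hdc : d ≠ c) (P : List Int) (l : List Char) :
    ∀ (pre : List Char),
    (pvCheckT d c l (pre.count d : Int) (P.drop (pre.count c)) = true ↔
      ∀ mid post, l = mid ++ c :: post →
        ∀ x, P[(pre ++ mid).count c]? = some x → x ≤ ((pre ++ mid).count d : Int)) := by
  induction l with
  | nil =>
    intro pre
    simp only [pvCheckT]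
    constructor
    · intro _ mid post hl; exact absurd hl (by simp)
    · intro _; trivial
  | cons ch rest ih =>
    intro pre
    by_cases h1 : ch = d
    · simp only [pvCheckT, if_pos h1]
      have e1 : (pre.count d : Int) + 1 = ((pre ++ [ch]).count d : Int) := by
        rw [List.count_append, List.count_singleton, if_pos (by simp [h1])]
        push_cast; ring
      have e2 : P.drop (pre.count c) = P.drop ((pre ++ [ch]).count c) := by
        rw [List.count_append, List.count_singleton, if_neg (by simp [h1 ▸ hdc]), Nat.add_zero]
      rw [e1, e2, ih (pre ++ [ch])]
      constructor
      · intro h mid post hl x hx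
        cases mid with
        | nil =>
          rw [List.nil_append] at hl
          injection hl with h' _
          exact absurd (h1.symm.trans h') hdc
        | cons y mid' =>
          rw [List.cons_append] at hl
          injection hl with hy hrest
          subst hy
          have ha : pre ++ ch :: mid' = (pre ++ [ch]) ++ mid' := by simp
          rw [ha] at hx ⊢
          exact h mid' post hrest x hx
      · intro h mid' post hrest x hx
        have ha : (pre ++ [ch]) ++ mid' = pre ++ ch :: mid' := by simp
        rw [ha] at hx ⊢
        exact h (ch :: mid') post (by rw [hrest, List.cons_append]) x hx
    · by_cases h2 : ch = c
      · subst h2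
        cases hdrop : P.drop (pre.count ch) with
        | nil =>
          simp only [pvCheckT, if_neg h1, if_true]
          have hlen : P.length ≤ pre.count ch := by
            rwa [← List.drop_eq_nil_iff]
          constructor
          · intro _ mid post hl x hx
            have hbd : (pre ++ mid).count ch < P.length := (List.getElem?_eq_some_iff.1 hx).1
            rw [List.count_append] at hbd
            omega
          · intro _; trivial
        | cons p ps =>
          simp only [pvCheckT, if_neg h1, if_true]
          have hP : P[pre.count ch]? = some p := by
            rw [← List.head?_drop, hdrop]; rfl
          have hps : ps = P.drop (pre.count ch + 1) := by
            rw [← List.tail_drop, hdrop]; rfl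
          by_cases hp : (pre.count d : Int) < p
          · rw [if_pos hp]
            apply iff_of_false (by simp)
            intro h
            have hh := h [] rest (by simp) p (by simpa using hP)
            simp only [List.append_nil] at hh
            omega
          · rw [if_neg hp]
            have e2 : ps = P.drop ((pre ++ [ch]).count ch) := by
              rw [List.count_append, List.count_singleton, if_pos (by simp)]
              exact hps
            have e1 : (pre.count d : Int) = ((pre ++ [ch]).count d : Int) := by
              rw [List.count_append, List.count_singleton, if_neg (by simp [Ne.symm hdc]), Nat.add_zero]
            rw [e2, e1, ih (pre ++ [ch])]
            constructor
            · intro h mid post hl x hx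
              cases mid with
              | nil =>
                simp only [List.append_nil] at hx ⊢
                have hxp : x = p := by
                  rw [hP] at hx
                  exact (Option.some_inj.1 hx).symm
                omega
              | cons y mid' =>
                rw [List.cons_append] at hl
                injection hl with hy hrest
                subst hy
                have ha : pre ++ ch :: mid' = (pre ++ [ch]) ++ mid' := by simp
                rw [ha] at hx ⊢
                exact h mid' post hrest x hx
            · intro h mid' post hrest x hx
              have ha : (pre ++ [ch]) ++ mid' = pre ++ ch :: mid' := by simp
              rw [ha] at hx ⊢
              exact h (ch :: mid') post (by rw [hrest, List.cons_append]) x hx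
      · simp only [pvCheckT, if_neg h1, if_neg h2]
        have e1 : (pre.count d : Int) = ((pre ++ [ch]).count d : Int) := by
          rw [List.count_append, List.count_singleton, if_neg (by simp [h1]), Nat.add_zero]
        have e2 : P.drop (pre.count c) = P.drop ((pre ++ [ch]).count c) := by
          rw [List.count_append, List.count_singleton, if_neg (by simp [h2]), Nat.add_zero]
        rw [e1, e2, ih (pre ++ [ch])]
        constructor
        · intro h mid post hl x hx
          cases mid with
          | nil =>
            rw [List.nil_append] at hl
            injection hl with h' _
            exact absurd h' h2
          | cons y mid' =>
            rw [List.cons_append] at hl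
            injection hl with hy hrest
            subst hy
            have ha : pre ++ ch :: mid' = (pre ++ [ch]) ++ mid' := by simp
            rw [ha] at hx ⊢
            exact h mid' post hrest x hx
        · intro h mid' post hrest x hx
          have ha : (pre ++ [ch]) ++ mid' = pre ++ ch :: mid' := by simp
          rw [ha] at hx ⊢
          exact h (ch :: mid') post (by rw [hrest, List.cons_append]) x hx

theorem pvB_iff (sL tL : List Char) :
    ((if (PySem.Set.ofList tL).any (fun c => decide (sL.count c < tL.count c)) then false
      else (PySem.Set.ofList tL).all (fun c =>
        (PySem.Set.ofList sL).all (fun d =>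
          if '0' ≤ d ∧ d < c then pvCheckT d c tL 0 (pvPrefS d c sL 0) else true))) = true)
    ↔ pvOk sL tL := by
  have hle_iff : ∀ a b : Char, a ≤ b ↔ a.toNat ≤ b.toNat := fun a b => by
    rw [Char.le_def, UInt32.le_iff_toNat_le]; exact Iff.rfl
  have hlt_iff : ∀ a b : Char, a < b ↔ a.toNat < b.toNat := fun a b => by
    rw [Char.lt_def, UInt32.lt_iff_toNat_lt]; exact Iff.rfl
  by_cases hov : ((PySem.Set.ofList tL).any (fun c => decide (sL.count c < tL.count c))) = true
  · rw [if_pos hov]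
    apply iff_of_false (by simp)
    intro hok
    obtain ⟨c, hc, hdec⟩ := List.any_eq_true.1 hov
    rw [decide_eq_true_eq] at hdec
    exact absurd (hok.1 c) (by omega)
  · rw [if_neg hov]
    have hst1 : ∀ c, tL.count c ≤ sL.count c := by
      intro c
      by_cases hmem : c ∈ tL
      · by_contra hlt
        exact hov (List.any_eq_true.2
          ⟨c, (PySem.Set.mem_ofList tL c).2 hmem, by rw [decide_eq_true_eq]; omega⟩)
      · rw [List.count_eq_zero.2 hmem]
        exact Nat.zero_le _
    constructor
    · intro hall
      refine ⟨hst1, ?_⟩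
      intro mid c post hl u v hu hcnt d hd1 hd2
      have hcmem : c ∈ tL := by rw [hl]; simp
      by_cases hdmem : d ∈ sL
      · have hdc : d ≠ c := fun h => by subst h; omega
        have hchk := (List.all_eq_true.1
            ((List.all_eq_true.1 hall) c ((PySem.Set.mem_ofList tL c).2 hcmem)))
            d ((PySem.Set.mem_ofList sL d).2 hdmem)
        rw [if_pos ⟨(hle_iff '0' d).2 (by exact hd1), (hlt_iff d c).2 hd2⟩] at hchk
        have hiff := pvCheckT_char d c hdc (pvPrefS d c sL 0) tL []
        simp only [List.count_nil, Nat.cast_zero, List.drop_zero, List.nil_append] at hiff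
        rw [hiff] at hchk
        have hx : (pvPrefS d c sL 0)[mid.count c]? = some ((0 : Int) + u.count d) := by
          rw [hu, ← hcnt]
          exact pvPrefS_getElem d c hdc u v 0
        have := hchk mid post hl _ hx
        omega
      · have hnu : u.count d = 0 := by
          refine List.count_eq_zero.2 (fun hmem => hdmem ?_)
          rw [hu]
          exact List.mem_append_left _ hmem
        omega
    · intro hok
      apply List.all_eq_true.2
      intro c hcmem'
      apply List.all_eq_true.2
      intro d hdmem'
      split_ifs with hg
      · obtain ⟨hg1, hg2⟩ := hg
        have hd48 : 48 ≤ d.toNat := (hle_iff '0' d).1 hg1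
        have hdlt : d.toNat < c.toNat := (hlt_iff d c).1 hg2
        have hdc : d ≠ c := fun h => by subst h; omega
        have hiff := pvCheckT_char d c hdc (pvPrefS d c sL 0) tL []
        simp only [List.count_nil, Nat.cast_zero, List.drop_zero, List.nil_append] at hiff
        rw [hiff]
        intro mid post hl x hx
        have hmlen : mid.count c < sL.count c := by
          have := (List.getElem?_eq_some_iff.1 hx).1
          rwa [pvPrefS_length d c hdc] at this
        obtain ⟨u, v, hu, hcnt⟩ := pv_exists_split c sL (mid.count c) hmlen
        have hx2 : (pvPrefS d c sL 0)[mid.count c]? = some ((0 : Int) + u.count d) := by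
          rw [hu, ← hcnt]
          exact pvPrefS_getElem d c hdc u v 0
        have hxval : x = (0 : Int) + u.count d := by
          rw [hx2] at hx
          exact (Option.some_inj.1 hx).symm
        have hle := hok.2 mid c post hl u v hu hcnt d hd48 hdlt
        omega
      · rfl

-- ===== VERDICT (by name: the statement is the Claim_ definition above) =====
theorem isTransformable_spec : Claim_equal_isTransformable := by
  intro s t h
  have hts : ∀ c ∈ t.toList, c.toNat ≤ 126 := by
    intro c hc
    have hd : pvDomStr t = true := by
      unfold Dom_isTransformable at h
      simp only [Bool.and_eq_true] at h
      exact h.2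
    have := (List.all_eq_true.1 hd) c hc
    unfold pvDomChar at this
    simp only [Bool.or_eq_true, Bool.and_eq_true, decide_eq_true_eq, beq_iff_eq] at this
    omega
  show isTransformable s t = isTransformable_alt s t
  have hA := pvA_iff s.toList t.toList hts
  have hB := pvB_iff s.toList t.toList
  unfold isTransformable isTransformable_alt
  rw [Bool.eq_iff_iff, hA, ← hB]
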